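-- pv_equiv track=rewrite | github.com/zjl233/pyLeetCode | advanced_lab1/assign_task_to_robot.py | assign_task
-- ===== SOURCE A (Python) =====
-- from typing import NamedTuple, Tuple, List
--
-- def assign_task(robots: List[Tuple[int, int]], tasks: List[Tuple[int, int]]) -> Tuple[int, int]:
--     """
--     题目地址：
--     https://www.nowcoder.com/study/live/350/2/6
--     课后作业3-安排机器
--     pypy 3.6.1
--
--     题型：
--     贪心
--
--     解题思路：
--     每次统计”刚好“在时间上满足要求的机器人
--     再从刚好满足时间要求的机器人里，挑一个等级最低的
--
--     参考：
--     https://www.nowcoder.com/questionTerminal/42e7ff5c5696445ab907caff17fc9e15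
--     @xiao_coco
--
--     难度评价：
--     <<思维[想不到] Coding[有点绕]>>
--
--     time: O(n)
--     space: O(n)
--     ac: 100%
--     注：用 NamedTuple 会超内存
--
--     """
--     # robots = [Pair(t, l) for t, l in robots_]
--     # tasks = [Pair(t, l) for t, l in tasks_]
--
--     robots.sort(reverse=True)
--     tasks.sort(reverse=True)
--     # robots.sort(key=lambda robot: 200 * robot.time + 3 * robot.level)
--     # tasks.sort(key=lambda task: 200 * task.time + 3 * task.level, reverse=True)
--
--     cnt = 0  # 完成的任务数
--     profit = 0  # 利润
--
--     # 统计每个 level 有几台 robot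
--     levels = [0 for _ in range(101)]
--     # 指向 robots 的指针，表明已经统计了多少台 robot
--     j = 0
--     for task in tasks:
--         # 统计，在时间上，可以完成当前 task 的 robot
--         while j < len(robots):
--             robot = robots[j]
--             if robot[0] >= task[0]:
--                 levels[robot[1]] += 1
--                 j += 1
--             else:
--                 # 碰到了 robot[0] < task[0] 的情况，应为数组是按照 time 排的，所有后面的 robot 时间也都小于 task 时间
--                 break
--
--         # 分配 task 给 robot，找在等级上，刚好可以满足要求（也就是略大于 task）的 robot
--         # levels 数组的长度为 101, 100 是等级上限，
--         for i in range(task[1], len(levels)):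
--             # 有满足条件的机器人
--             # 注：上一个 while 保证 time，这个 for 保证 level
--             if levels[i] != 0:
--                 cnt += 1
--                 profit += 200 * task[0] + 3 * task[1]
--                 levels[i] -= 1
--                 break
--
--     return cnt, profit
-- ===== SOURCE B (Python) =====
-- # B: same greedy, but the time-qualifying robots' levels are kept in a sorted list
-- # maintained and queried by hand-written binary search (bisect_left) instead of a
-- # 101-bucket count array scanned linearly; same in-place sorts of robots/tasks as A.
-- from typing import Tuple, List
--
--
-- def _bisect_left(a, x):
--     lo, hi = 0, len(a)
--     while lo < hi:
--         mid = (lo + hi) // 2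
--         if a[mid] < x:
--             lo = mid + 1
--         else:
--             hi = mid
--     return lo
--
--
-- def assign_task(robots: List[Tuple[int, int]], tasks: List[Tuple[int, int]]) -> Tuple[int, int]:
--     robots.sort(reverse=True)
--     tasks.sort(reverse=True)
--     cnt = 0
--     profit = 0
--     lvls = []  # sorted (ascending) levels of the robots whose time qualifies so far
--     j = 0
--     for task in tasks:
--         while j < len(robots) and robots[j][0] >= task[0]:
--             lvl = robots[j][1]
--             lvls.insert(_bisect_left(lvls, lvl), lvl)
--             j += 1
--         pos = _bisect_left(lvls, task[1])
--         if pos < len(lvls):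
--             cnt += 1
--             profit += 200 * task[0] + 3 * task[1]
--             lvls.pop(pos)
--     return cnt, profit
-- ===== Notes on version B (the rewrite author's own statement) =====
-- stated objective: alternative
-- what changed: replaces A's 101-bucket count array and its linear bucket scan per task with a sorted list of the time-qualifying robots' levels, maintained and queried by a hand-written binary search (bisect_left insert / pop of the smallest qualifying level)
-- outside the precondition, e.g. on assign_task([(5, -1)], [(3, 0)]): A returns (1, 600), B returns (0, 0); on assign_task([(5, 100), (5, 0)], [(3, -1), (2, 100)]): A returns (1, 597), B returns (2, 1297); on assign_task([(5, 101)], [(3, 0)]): A raises IndexError, B returns (1, 600)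
import Mathlib
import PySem

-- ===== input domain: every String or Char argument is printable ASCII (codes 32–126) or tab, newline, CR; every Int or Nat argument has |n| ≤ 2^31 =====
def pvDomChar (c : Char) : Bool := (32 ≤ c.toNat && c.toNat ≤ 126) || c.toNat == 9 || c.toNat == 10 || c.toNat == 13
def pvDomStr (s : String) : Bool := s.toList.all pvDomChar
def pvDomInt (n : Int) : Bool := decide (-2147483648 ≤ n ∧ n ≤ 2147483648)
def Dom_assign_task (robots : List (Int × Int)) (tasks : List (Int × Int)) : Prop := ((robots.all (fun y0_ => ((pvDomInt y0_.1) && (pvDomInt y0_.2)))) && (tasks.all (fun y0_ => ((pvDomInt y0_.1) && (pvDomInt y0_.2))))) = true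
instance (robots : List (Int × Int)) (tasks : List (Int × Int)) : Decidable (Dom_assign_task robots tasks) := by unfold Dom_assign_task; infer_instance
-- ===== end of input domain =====

-- B replaces A's 101-bucket count array and its linear level scan by a sorted list of the
-- time-qualifying robots' levels, maintained and queried with a hand-written binary search
-- (objective: alternative).  Both A and B sort `robots` and `tasks` in place (same mutation);
-- the theorems below are about the return value.

-- ===== PORT A =====

-- `xs[i] = v` for a Python list: negative index from the end; out of range = IndexError
-- (returns xs unchanged there; such inputs are outside Pre_).
def pySetIdx (xs : List Int) (i : Int) (v : Int) : List Int :=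
  let j := if i < 0 then i + xs.length else i
  if 0 ≤ j ∧ j < xs.length then xs.set j.toNat v else xs

-- `levels[l] += 1` (IndexError = none: outside Pre_, returns levels unchanged).
def aBump (levels : List Int) (l : Int) : List Int :=
  match PySem.List.pyGet? levels l with
  | some v => pySetIdx levels l (v + 1)
  | none => levels

-- A's inner `while j < len(robots): … break`; j is a nonnegative counter, kept as Nat;
-- fuel (always called with fuel = robots.length ≥ the number of remaining iterations)
-- makes the loop structurally recursive.
def aWhile (robots : List (Int × Int)) (tt : Int) : Nat → Nat → List Int → List Int × Nat
  | 0, j, levels => (levels, j)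
  | fuel + 1, j, levels =>
    if h : j < robots.length then
      let robot := robots[j]
      if robot.1 ≥ tt then aWhile robots tt fuel (j + 1) (aBump levels robot.2)
      else (levels, j)
    else (levels, j)

-- A's `for i in range(task[1], len(levels)): … break` (IndexError = none: outside Pre_).
def aScan (tt tl : Int) : List Int → Int × Int × List Int → Int × Int × List Int
  | [], st => st
  | i :: rest, (cnt, profit, levels) =>
    match PySem.List.pyGet? levels i with
    | none => (cnt, profit, levels)
    | some v =>
      if v ≠ 0 then (cnt + 1, profit + (200 * tt + 3 * tl), pySetIdx levels i (v - 1))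
      else aScan tt tl rest (cnt, profit, levels)

def assign_task (robots : List (Int × Int)) (tasks : List (Int × Int)) : Int × Int :=
  let robots := PySem.List.sorted2 robots (fun r => r.1) (fun r => r.2) true
  let tasks := PySem.List.sorted2 tasks (fun t => t.1) (fun t => t.2) true
  let st :=
    tasks.foldl
      (fun (st : Int × Int × List Int × Nat) task =>
        let w := aWhile robots task.1 robots.length st.2.2.2 st.2.2.1
        let r := aScan task.1 task.2 (PySem.List.pyRange task.2 101 1) (st.1, st.2.1, w.1)
        (r.1, r.2.1, r.2.2, w.2))
      (0, 0, List.replicate 101 (0 : Int), 0)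
  (st.1, st.2.1)

-- ===== PORT B =====

-- Source B's hand-written bisect_left: `while lo < hi: …`; lo, hi stay in [0, len(a)], so they
-- are kept as Nat ((lo+hi)//2 = Nat division on nonnegatives) and a[mid] is always in range.
-- fuel (called with fuel = len(a) ≥ hi - lo) makes the loop structurally recursive.
def bLoop (a : List Int) (x : Int) : Nat → Nat → Nat → Nat
  | 0, lo, _ => lo
  | fuel + 1, lo, hi =>
    if lo < hi then
      let mid := (lo + hi) / 2
      if a.getD mid 0 < x then bLoop a x fuel (mid + 1) hi
      else bLoop a x fuel lo mid
    else lo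

def bisectLeftB (a : List Int) (x : Int) : Nat := bLoop a x a.length 0 a.length

-- B's inner while loop: insert each qualifying robot's level at its bisect_left position.
def bWhile (robots : List (Int × Int)) (tt : Int) : Nat → Nat → List Int → List Int × Nat
  | 0, j, lvls => (lvls, j)
  | fuel + 1, j, lvls =>
    if h : j < robots.length then
      if robots[j].1 ≥ tt then
        let lvl := robots[j].2
        bWhile robots tt fuel (j + 1) (PySem.List.insert lvls ((bisectLeftB lvls lvl : Nat) : Int) lvl)
      else (lvls, j)
    else (lvls, j)

def assign_task_alt (robots : List (Int × Int)) (tasks : List (Int × Int)) : Int × Int :=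
  let robots := PySem.List.sorted2 robots (fun r => r.1) (fun r => r.2) true
  let tasks := PySem.List.sorted2 tasks (fun t => t.1) (fun t => t.2) true
  let st :=
    tasks.foldl
      (fun (st : Int × Int × List Int × Nat) task =>
        let w := bWhile robots task.1 robots.length st.2.2.2 st.2.2.1
        let pos := bisectLeftB w.1 task.2
        if pos < w.1.length then
          -- lvls.pop(pos); pos < len(lvls), so pop? is some
          match PySem.List.pop? w.1 ((pos : Nat) : Int) with
          | some p => (st.1 + 1, st.2.1 + (200 * task.1 + 3 * task.2), p.2, w.2)
          | none => (st.1, st.2.1, w.1, w.2)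
        else (st.1, st.2.1, w.1, w.2))
      (0, 0, ([] : List Int), 0)
  (st.1, st.2.1)

-- ===== PRECONDITION & SPEC =====
-- Pre_ restricts levels to the problem's stated range (the 101-bucket array is the level
-- domain 0..100): every robot that could ever be consumed (its time qualifies for some
-- task) must have level in [0,100] — A raises IndexError above 100 and wraps a negative
-- level to a high bucket — and task levels must be nonnegative — a negative task level
-- makes A's scan start at a negative (wrapping) index; both corners are artefacts of A's
-- bucket indexing, outside the problem's natural domain. Robots no task can ever use are
-- unconstrained (neither program ever touches their level).
def Pre_assign_task (robots : List (Int × Int)) (tasks : List (Int × Int)) : Prop :=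
  (∀ r ∈ robots, (0 ≤ r.2 ∧ r.2 ≤ 100) ∨ ∀ t ∈ tasks, r.1 < t.1) ∧
    (∀ t ∈ tasks, 0 ≤ t.2)
instance (robots : List (Int × Int)) (tasks : List (Int × Int)) : Decidable (Pre_assign_task robots tasks) := by unfold Pre_assign_task; infer_instance

def pvWitness_assign_task : (List (Int × Int)) × (List (Int × Int)) :=
  ([(5, 2), (1, 7)], [(3, 1), (0, 2)])

def Spec_assign_task (robots : List (Int × Int)) (tasks : List (Int × Int)) (out : Int × Int) : Prop := out = assign_task_alt robots tasks
instance (robots : List (Int × Int)) (tasks : List (Int × Int)) (out : Int × Int) : Decidable (Spec_assign_task robots tasks out) := by unfold Spec_assign_task; infer_instance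

-- ===== CLAIM (what is proved, stated in full; the proofs are below) =====
def Claim_equal_assign_task : Prop := ∀ (robots : List (Int × Int)) (tasks : List (Int × Int)), Dom_assign_task robots tasks → Pre_assign_task robots tasks → Spec_assign_task robots tasks (assign_task robots tasks)

-- ===== LEMMAS AND PROOFS =====

-- The abstraction: a bucket array L (bucket n counts robots of level k+n) read out as the
-- sorted multiset of levels it represents.
def toL : Int → List Int → List Int
  | _, [] => []
  | k, c :: rest => List.replicate c.toNat k ++ toL (k + 1) rest

theorem mem_toL {x : Int} : ∀ {L : List Int} {k : Int}, x ∈ toL k L → k ≤ x ∧ x < k + L.length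
  | [], k, h => by simp [toL] at h
  | c :: rest, k, h => by
    simp only [toL, List.mem_append] at h
    rcases h with h | h
    · rcases List.eq_of_mem_replicate h with rfl
      simp
    · have := mem_toL h
      simp at this ⊢
      omega

theorem toL_split : ∀ (m : Nat) (k : Int) (L : List Int),
    toL k L = toL k (L.take m) ++ toL (k + m) (L.drop m)
  | 0, k, L => by simp [toL]
  | m + 1, k, [] => by simp [toL]
  | m + 1, k, c :: rest => by
    have := toL_split m (k + 1) rest
    simp only [toL, List.take_succ_cons, List.drop_succ_cons, this]
    have : k + 1 + (m : Int) = k + ((m : Int) + 1) := by ring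
    simp [this]

theorem toL_nil_of_zeros : ∀ {M : List Int} {k : Int}, (∀ x ∈ M, x.toNat = 0) → toL k M = []
  | [], k, _ => rfl
  | c :: rest, k, h => by
    have hc : c.toNat = 0 := h c (by simp)
    have := toL_nil_of_zeros (M := rest) (k := k + 1) (fun x hx => h x (by simp [hx]))
    simp [toL, hc, this]

-- first level ≥ k with a nonzero bucket, as A's scan finds it
def firstHit? : Int → List Int → Option Int
  | _, [] => none
  | k, c :: rest => if c.toNat ≠ 0 then some k else firstHit? (k + 1) rest

theorem bLoop_eq (a P S : List Int) (x : Int) (hps : a = P ++ S)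
    (hP : ∀ y ∈ P, y < x) (hS : ∀ y ∈ S, ¬ y < x) :
    ∀ fuel lo hi, hi - lo ≤ fuel → lo ≤ P.length → P.length ≤ hi → hi ≤ a.length →
      bLoop a x fuel lo hi = P.length := by
  intro n
  induction n with
  | zero =>
    intro lo hi hn h1 h2 h3
    simp only [bLoop]
    omega
  | succ n ih =>
    intro lo hi hn h1 h2 h3
    simp only [bLoop]
    by_cases hlt : lo < hi
    · simp only [hlt, if_true]
      have hmlo : lo ≤ (lo + hi) / 2 := by omega
      have hmhi : (lo + hi) / 2 < hi := by omega
      have hmlen : (lo + hi) / 2 < a.length := by omega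
      by_cases hm : (lo + hi) / 2 < P.length
      · have hmem : a.getD ((lo + hi) / 2) 0 = P[(lo + hi) / 2] := by
          subst hps
          simp [List.getD_eq_getElem?_getD, List.getElem?_append_left hm,
            List.getElem?_eq_getElem hm]
        have : a.getD ((lo + hi) / 2) 0 < x := by
          rw [hmem]; exact hP _ (List.getElem_mem hm)
        simp only [this, if_true]
        exact ih ((lo + hi) / 2 + 1) hi (by omega) (by omega) h2 h3
      · have hslen : (lo + hi) / 2 - P.length < S.length := by
          have := List.length_append (as := P) (bs := S)
          rw [← hps] at this
          omega
        have hmem : a.getD ((lo + hi) / 2) 0 = S[(lo + hi) / 2 - P.length] := by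
          subst hps
          simp [List.getD_eq_getElem?_getD, List.getElem?_append_right (by omega : P.length ≤ (lo + hi) / 2),
            List.getElem?_eq_getElem hslen]
        have : ¬ a.getD ((lo + hi) / 2) 0 < x := by
          rw [hmem]; exact hS _ (List.getElem_mem hslen)
        simp only [this, if_false]
        exact ih lo ((lo + hi) / 2) (by omega) h1 (by omega) (by omega)
    · simp only [hlt, if_false]
      omega

theorem bisect_toL (L : List Int) (x : Int) (hx : 0 ≤ x) :
    bisectLeftB (toL 0 L) x = (toL 0 (L.take x.toNat)).length ∧
      toL 0 L = toL 0 (L.take x.toNat) ++ toL x (L.drop x.toNat) := by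
  have hsplit := toL_split x.toNat 0 L
  rw [Int.zero_add, Int.toNat_of_nonneg hx] at hsplit
  refine ⟨?_, hsplit⟩
  have hP : ∀ y ∈ toL 0 (L.take x.toNat), y < x := by
    intro y hy
    have h := mem_toL hy
    have : (L.take x.toNat).length ≤ x.toNat := by simp
    omega
  have hS : ∀ y ∈ toL x (L.drop x.toNat), ¬ y < x := by
    intro y hy
    have h := mem_toL hy
    omega
  have hlen : (toL 0 (L.take x.toNat)).length ≤ (toL 0 L).length := by
    rw [hsplit]; simp
  exact bLoop_eq _ _ _ x hsplit hP hS (toL 0 L).length 0 (toL 0 L).length (by omega) (by omega) hlen le_rfl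

theorem toL_insert (L : List Int) (x : Int) (hx : 0 ≤ x) (hlt : x.toNat < L.length)
    (hc : 0 ≤ L.getD x.toNat 0) :
    PySem.List.insert (toL 0 L) ((bisectLeftB (toL 0 L) x : Nat) : Int) x
      = toL 0 (L.set x.toNat (L.getD x.toNat 0 + 1)) := by
  obtain ⟨hb, hsplit⟩ := bisect_toL L x hx
  rw [List.getD_eq_getElem L 0 hlt] at hc ⊢
  have hlen : (toL 0 (L.take x.toNat)).length ≤ (toL 0 L).length := by rw [hsplit]; simp
  rw [hb, PySem.List.insert_natCast _ _ _ hlen]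
  conv_lhs => rw [hsplit, List.take_left' rfl, List.drop_left' rfl]
  have hL' : L.set x.toNat (L[x.toNat] + 1)
      = L.take x.toNat ++ (L[x.toNat] + 1) :: L.drop (x.toNat + 1) := by
    rw [List.set_eq_take_append_cons_drop]; simp [hlt]
  rw [toL_split x.toNat 0 (L.set x.toNat (L[x.toNat] + 1)), hL',
    List.take_left' (by simp; omega), List.drop_left' (by simp; omega)]
  congr 1
  rw [List.drop_eq_getElem_cons hlt]
  have hx' : (0 : Int) + (x.toNat : Int) = x := by omega
  rw [hx']
  show x :: (List.replicate L[x.toNat].toNat x ++ toL (x + 1) (L.drop (x.toNat + 1)))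
    = List.replicate (L[x.toNat] + 1).toNat x ++ toL (x + 1) (L.drop (x.toNat + 1))
  have : (L[x.toNat] + 1).toNat = L[x.toNat].toNat + 1 := by omega
  rw [this, List.replicate_succ]
  simp

theorem firstHit_none : ∀ {M : List Int} {k : Int}, firstHit? k M = none → toL k M = []
  | [], k, _ => rfl
  | c :: rest, k, h => by
    by_cases hc : c.toNat ≠ 0
    · simp [firstHit?, hc] at h
    · simp only [firstHit?, hc, if_false] at h
      simp only [not_not] at hc
      simp [toL, hc, firstHit_none h]

theorem firstHit_some : ∀ {M : List Int} {k i : Int}, (∀ x ∈ M, 0 ≤ x) →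
    firstHit? k M = some i →
    ∃ d : Nat, i = k + d ∧ ∃ hd : d < M.length, 0 < M[d] ∧
      toL k M = i :: toL k (M.set d (M[d] - 1))
  | [], k, i, _, h => by simp [firstHit?] at h
  | c :: rest, k, i, hpos, h => by
    by_cases hc : c.toNat ≠ 0
    · simp only [firstHit?] at h
      rw [if_pos hc] at h
      injection h with h
      subst h
      have hc0 : 0 ≤ c := hpos c (by simp)
      refine ⟨0, by simp, by simp, by simpa using by omega, ?_⟩
      show List.replicate c.toNat k ++ toL (k + 1) rest
        = k :: toL k ((c - 1) :: rest)
      have : c.toNat = (c - 1).toNat + 1 := by omega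
      rw [this, List.replicate_succ]
      show k :: (List.replicate (c - 1).toNat k ++ toL (k + 1) rest)
        = k :: (List.replicate (c - 1).toNat k ++ toL (k + 1) rest)
      rfl
    · simp only [firstHit?, hc, if_false] at h
      simp only [not_not] at hc
      obtain ⟨d, hi, hd, hMd, htl⟩ :=
        firstHit_some (fun x hx => hpos x (by simp [hx])) h
      refine ⟨d + 1, by push_cast; omega, by simpa using by omega, by simpa using hMd, ?_⟩
      simp only [List.getElem_cons_succ, List.set_cons_succ]
      show List.replicate c.toNat k ++ toL (k + 1) rest
        = i :: (List.replicate c.toNat k ++ toL (k + 1) (rest.set d (rest[d] - 1)))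
      simp [hc, htl]

theorem aBump_eq (L : List Int) (l : Int) (h0 : 0 ≤ l) (hlt : l.toNat < L.length) :
    aBump L l = L.set l.toNat (L.getD l.toNat 0 + 1) := by
  rw [aBump, PySem.List.pyGet?_of_nonneg L h0, List.getElem?_eq_getElem hlt]
  rw [List.getD_eq_getElem L 0 hlt]
  unfold pySetIdx
  have h1 : ¬ l < 0 := by omega
  have h2 : 0 ≤ l ∧ l < (L.length : Int) := by omega
  simp only [h1, if_false, h2, and_self, if_true]

theorem step_while (robots : List (Int × Int)) (tt : Int)
    (hr : ∀ r ∈ robots, tt ≤ r.1 → 0 ≤ r.2 ∧ r.2 ≤ 100) :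
    ∀ fuel j L, robots.length - j ≤ fuel → L.length = 101 → (∀ x ∈ L, 0 ≤ x) →
      bWhile robots tt fuel j (toL 0 L)
          = (toL 0 (aWhile robots tt fuel j L).1, (aWhile robots tt fuel j L).2) ∧
      (aWhile robots tt fuel j L).1.length = 101 ∧
      (∀ x ∈ (aWhile robots tt fuel j L).1, 0 ≤ x) := by
  intro n
  induction n with
  | zero =>
    intro j L hn hlen hnn
    simp only [aWhile, bWhile]
    exact ⟨by simp, hlen, hnn⟩
  | succ n ih =>
    intro j L hn hlen hnn
    simp only [aWhile, bWhile]
    by_cases hj : j < robots.length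
    · simp only [dif_pos hj]
      by_cases hge : robots[j].1 ≥ tt
      · simp only [hge, if_true]
        have hmem := List.getElem_mem hj
        have hb := hr robots[j] hmem hge
        have hx0 : 0 ≤ robots[j].2 := hb.1
        have hxlt : (robots[j].2).toNat < L.length := by omega
        have hgd : 0 ≤ L.getD (robots[j].2).toNat 0 := by
          rw [List.getD_eq_getElem L 0 hxlt]
          exact hnn _ (List.getElem_mem hxlt)
        rw [toL_insert L robots[j].2 hx0 hxlt hgd, ← aBump_eq L robots[j].2 hx0 hxlt]
        exact ih (j + 1) (aBump L robots[j].2)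
          (by omega)
          (by rw [aBump_eq L robots[j].2 hx0 hxlt]; simp [hlen])
          (by
            rw [aBump_eq L robots[j].2 hx0 hxlt]
            intro x hx
            rcases List.mem_or_eq_of_mem_set hx with h | h
            · exact hnn x h
            · subst h; have := hgd; omega)
      · simp only [hge, if_false]
        exact ⟨by simp, hlen, hnn⟩
    · simp only [hj, dif_neg, not_false_iff]
      exact ⟨by simp, hlen, hnn⟩

theorem aScan_eq (tt tl cnt profit : Int) :
    ∀ (n : Nat) (t : Int), 0 ≤ t → 101 ≤ t + n → ∀ (L : List Int), L.length = 101 →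
      (∀ x ∈ L, 0 ≤ x) →
      aScan tt tl (PySem.List.pyRange t 101 1) (cnt, profit, L) =
        match firstHit? t (L.drop t.toNat) with
        | none => (cnt, profit, L)
        | some i => (cnt + 1, profit + (200 * tt + 3 * tl),
            L.set i.toNat (L.getD i.toNat 0 - 1)) := by
  intro n
  induction n with
  | zero =>
    intro t ht hbound L hlen hnn
    have h101 : (101 : Int) ≤ t := by omega
    rw [PySem.List.pyRange_one_eq_nil h101]
    have hdrop : L.drop t.toNat = [] := by
      apply List.drop_eq_nil_of_le
      omega
    rw [hdrop]
    rfl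
  | succ n ih =>
    intro t ht hbound L hlen hnn
    by_cases h101 : (101 : Int) ≤ t
    · rw [PySem.List.pyRange_one_eq_nil h101]
      have hdrop : L.drop t.toNat = [] := by
        apply List.drop_eq_nil_of_le
        omega
      rw [hdrop]
      rfl
    · have hlt : t < 101 := by omega
      have htn : t.toNat < L.length := by omega
      rw [PySem.List.pyRange_one_cons hlt]
      have hget : PySem.List.pyGet? L t = some L[t.toNat] := by
        rw [PySem.List.pyGet?_of_nonneg L ht, List.getElem?_eq_getElem htn]
      rw [List.drop_eq_getElem_cons htn]
      have hnnc : 0 ≤ L[t.toNat] := hnn _ (List.getElem_mem htn)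
      by_cases hc : L[t.toNat] ≠ 0
      · have hc' : L[t.toNat].toNat ≠ 0 := by omega
        simp only [aScan, hget, firstHit?]
        have : pySetIdx L t (L[t.toNat] - 1) = L.set t.toNat (L.getD t.toNat 0 - 1) := by
          unfold pySetIdx
          have h1 : ¬ t < 0 := by omega
          have h2 : 0 ≤ t ∧ t < (L.length : Int) := by omega
          simp only [h1, if_false, h2, and_self, if_true, List.getD_eq_getElem L 0 htn]
        rw [this, if_pos hc, if_pos hc']
      · have hc0 : L[t.toNat] = 0 := by omega
        have hc' : ¬ L[t.toNat].toNat ≠ 0 := by omega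
        simp only [aScan, hget, firstHit?]
        rw [if_neg hc, if_neg hc']
        have hdrop1 : L.drop (t.toNat + 1) = L.drop (t + 1).toNat := by
          congr 1
          omega
        rw [hdrop1]
        exact ih (t + 1) (by omega) (by omega) L hlen hnn

-- named fold bodies (definitionally the lambdas inside assign_task / assign_task_alt)
def aBody (robots : List (Int × Int)) (st : Int × Int × List Int × Nat) (task : Int × Int) :
    Int × Int × List Int × Nat :=
  let w := aWhile robots task.1 robots.length st.2.2.2 st.2.2.1
  let r := aScan task.1 task.2 (PySem.List.pyRange task.2 101 1) (st.1, st.2.1, w.1)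
  (r.1, r.2.1, r.2.2, w.2)

def bBody (robots : List (Int × Int)) (st : Int × Int × List Int × Nat) (task : Int × Int) :
    Int × Int × List Int × Nat :=
  let w := bWhile robots task.1 robots.length st.2.2.2 st.2.2.1
  let pos := bisectLeftB w.1 task.2
  if pos < w.1.length then
    match PySem.List.pop? w.1 ((pos : Nat) : Int) with
    | some p => (st.1 + 1, st.2.1 + (200 * task.1 + 3 * task.2), p.2, w.2)
    | none => (st.1, st.2.1, w.1, w.2)
  else (st.1, st.2.1, w.1, w.2)

def RelST (stA stB : Int × Int × List Int × Nat) : Prop :=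
  stB = (stA.1, stA.2.1, toL 0 stA.2.2.1, stA.2.2.2) ∧
    stA.2.2.1.length = 101 ∧ (∀ x ∈ stA.2.2.1, 0 ≤ x)

theorem step_task (R : List (Int × Int)) (task : Int × Int)
    (hr : ∀ r ∈ R, task.1 ≤ r.1 → 0 ≤ r.2 ∧ r.2 ≤ 100) (ht : 0 ≤ task.2) (stA stB : Int × Int × List Int × Nat)
    (hrel : RelST stA stB) : RelST (aBody R stA task) (bBody R stB task) := by
  obtain ⟨cnt, profit, L, j⟩ := stA
  obtain ⟨hst, hlen, hnn⟩ := hrel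
  subst hst
  unfold aBody bBody
  dsimp only
  obtain ⟨hw, hlen', hnn'⟩ := step_while R task.1 hr R.length j L (by omega) hlen hnn
  rw [hw]
  dsimp only
  set L' := (aWhile R task.1 R.length j L).1 with hL'
  clear_value L'
  have hscan := aScan_eq task.1 task.2 cnt profit 101 task.2 ht (by omega) L' hlen' hnn'
  obtain ⟨hb, hsplit⟩ := bisect_toL L' task.2 ht
  rw [hscan]
  cases hfh : firstHit? task.2 (L'.drop task.2.toNat) with
  | none =>
    have hS : toL task.2 (L'.drop task.2.toNat) = [] := firstHit_none hfh
    have hpos : ¬ bisectLeftB (toL 0 L') task.2 < (toL 0 L').length := by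
      rw [hb]
      conv_rhs => rw [hsplit, hS]
      simp
    rw [if_neg hpos]
    exact ⟨rfl, hlen', hnn'⟩
  | some i =>
    obtain ⟨d, hi, hd, hMd, htl⟩ :=
      firstHit_some (fun x hx => hnn' x (List.mem_of_mem_drop hx)) hfh
    have hdl : (L'.drop task.2.toNat).length = 101 - task.2.toNat := by simp [hlen']
    have hmd : task.2.toNat + d < 101 := by omega
    have hdg : (L'.drop task.2.toNat)[d] = L'[task.2.toNat + d]'(by omega) :=
      List.getElem_drop
    have hiN : i.toNat = task.2.toNat + d := by omega
    have hpos : bisectLeftB (toL 0 L') task.2 < (toL 0 L').length := by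
      rw [hb]
      conv_rhs => rw [hsplit, htl]
      simp
    rw [if_pos hpos]
    have hplen : bisectLeftB (toL 0 L') task.2 < (toL 0 L').length := hpos
    rw [PySem.List.pop?_natCast _ _ hplen]
    dsimp only
    have herase : (toL 0 L').eraseIdx (bisectLeftB (toL 0 L') task.2)
        = toL 0 (L'.take task.2.toNat)
          ++ toL task.2 ((L'.drop task.2.toNat).set d ((L'.drop task.2.toNat)[d] - 1)) := by
      rw [hb]
      conv_lhs => rw [hsplit, htl]
      rw [List.eraseIdx_append_of_length_le le_rfl]
      simp
    have hgd : L'.getD i.toNat 0 = L'[task.2.toNat + d]'(by omega) := by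
      rw [hiN]
      exact List.getD_eq_getElem L' 0 (by omega)
    have hset : toL 0 (L'.set i.toNat (L'.getD i.toNat 0 - 1))
        = toL 0 (L'.take task.2.toNat)
          ++ toL task.2 ((L'.drop task.2.toNat).set d ((L'.drop task.2.toNat)[d] - 1)) := by
      rw [hgd, hiN, toL_split task.2.toNat 0 (L'.set (task.2.toNat + d) _)]
      rw [List.take_set_of_le (by omega), List.drop_set]
      have hnotlt : ¬ task.2.toNat + d < task.2.toNat := by omega
      rw [if_neg hnotlt]
      have h0m : (0 : Int) + (task.2.toNat : Int) = task.2 := by omega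
      rw [h0m]
      have hsub : task.2.toNat + d - task.2.toNat = d := by omega
      rw [hsub, hdg]
    refine ⟨?_, by simp [hlen'], ?_⟩
    · rw [herase, hset]
    · intro x hx
      rcases List.mem_or_eq_of_mem_set hx with h | h
      · exact hnn' x h
      · subst h
        rw [hgd]
        rw [hdg] at hMd
        omega

theorem fold_sim (R : List (Int × Int)) :
    ∀ (T : List (Int × Int)),
      (∀ t ∈ T, ∀ r ∈ R, t.1 ≤ r.1 → 0 ≤ r.2 ∧ r.2 ≤ 100) → (∀ t ∈ T, 0 ≤ t.2) →
      ∀ stA stB, RelST stA stB → RelST (T.foldl (aBody R) stA) (T.foldl (bBody R) stB)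
  | [], _, _, stA, stB, h => h
  | t :: rest, hR, hT, stA, stB, h => by
    simp only [List.foldl_cons]
    exact fold_sim R rest (fun x hx => hR x (by simp [hx])) (fun x hx => hT x (by simp [hx])) _ _
      (step_task R t (hR t (by simp)) (hT t (by simp)) stA stB h)

-- ===== VERDICT (by name: the statement is the Claim_ definition above) =====
theorem assign_task_spec : Claim_equal_assign_task := by
  intro robots tasks _ hpre
  unfold Spec_assign_task
  have hrR : ∀ t ∈ PySem.List.sorted2 tasks (fun t => t.1) (fun t => t.2) true,
      ∀ r ∈ PySem.List.sorted2 robots (fun r => r.1) (fun r => r.2) true,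
      t.1 ≤ r.1 → 0 ≤ r.2 ∧ r.2 ≤ 100 := by
    intro t htm r hrm hle
    rcases hpre.1 r ((PySem.List.sorted2_perm robots _ _ true).mem_iff.mp hrm) with h | h
    · exact h
    · have := h t ((PySem.List.sorted2_perm tasks _ _ true).mem_iff.mp htm)
      omega
  have htT : ∀ t ∈ PySem.List.sorted2 tasks (fun t => t.1) (fun t => t.2) true,
      0 ≤ t.2 := by
    intro t htm
    exact hpre.2 t ((PySem.List.sorted2_perm tasks _ _ true).mem_iff.mp htm)
  have hinit : RelST (0, 0, List.replicate 101 (0 : Int), 0) (0, 0, ([] : List Int), 0) := by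
    refine ⟨?_, by simp, by intro x hx; rcases List.eq_of_mem_replicate hx with rfl; omega⟩
    have : toL 0 (List.replicate 101 (0 : Int)) = [] :=
      toL_nil_of_zeros (fun x hx => by rcases List.eq_of_mem_replicate hx with rfl; rfl)
    rw [this]
  obtain ⟨hst, -, -⟩ := fold_sim (PySem.List.sorted2 robots (fun r => r.1) (fun r => r.2) true)
    (PySem.List.sorted2 tasks (fun t => t.1) (fun t => t.2) true) hrR htT _ _ hinit
  have hA : assign_task robots tasks =
      (((PySem.List.sorted2 tasks (fun t => t.1) (fun t => t.2) true).foldl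
        (aBody (PySem.List.sorted2 robots (fun r => r.1) (fun r => r.2) true))
        (0, 0, List.replicate 101 (0 : Int), 0)).1,
       ((PySem.List.sorted2 tasks (fun t => t.1) (fun t => t.2) true).foldl
        (aBody (PySem.List.sorted2 robots (fun r => r.1) (fun r => r.2) true))
        (0, 0, List.replicate 101 (0 : Int), 0)).2.1) := rfl
  have hB : assign_task_alt robots tasks =
      (((PySem.List.sorted2 tasks (fun t => t.1) (fun t => t.2) true).foldl
        (bBody (PySem.List.sorted2 robots (fun r => r.1) (fun r => r.2) true))
        (0, 0, ([] : List Int), 0)).1,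
       ((PySem.List.sorted2 tasks (fun t => t.1) (fun t => t.2) true).foldl
        (bBody (PySem.List.sorted2 robots (fun r => r.1) (fun r => r.2) true))
        (0, 0, ([] : List Int), 0)).2.1) := rfl
  rw [hA, hB, hst]
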